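-- pv_equiv track=rewrite | github.com/5OCEANS/SoYoon_Repository | DFS BFS/점프왕 쩰리 (Small).py | dfs
-- ===== SOURCE A (Python) =====
-- def dfs(N, mapList, visited, row, col):
--   # 게임판의 경계를 벗어나거나 이미 방문한 경우
--   if row < 0 or row >= N or col < 0 or col >= N or visited[row][col]:
--     return False
--
--   # 현재 위치가 목표 지점인 경우
--   if mapList[row][col] == -1:
--     return True
--
--   # 현재 칸의 이동값
--   jump = mapList[row][col]
--   if jump == 0:  # 이동할 수 없는 경우
--     return False
--
--   # 현재 위치 방문 처리
--   visited[row][col] = True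
--
--   # 아래쪽과 오른쪽으로 이동 시도
--   if dfs(N, mapList, visited, row + jump, col) or dfs(N, mapList, visited, row, col + jump):
--     return True
--
--   return False
-- ===== SOURCE B (Python) =====
-- def dfs(N, mapList, visited, row, col):
--     stack = [(row, col)]
--     while stack:
--         r, c = stack.pop()
--         if r < 0 or r >= N or c < 0 or c >= N or visited[r][c]:
--             continue
--         cell = mapList[r][c]
--         if cell == -1:
--             return True
--         if cell == 0:
--             continue
--         visited[r][c] = True
--         stack.append((r, c + cell))
--         stack.append((r + cell, c))
--     return False
-- ===== Notes on version B (the rewrite author's own statement) =====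
-- stated objective: alternative
-- what changed: Replaces the recursive two-branch DFS with an iterative DFS driven by an explicit list-as-stack (push right-move then down-move so down is popped first), preserving the down-then-right preorder, the early return on a -1 cell, and the identical visited mutations.
-- outside the precondition, e.g. on dfs(2, [[1, 1], [1, 1]], [[True, True], [True]], 0, 0): A returns False, B returns False
import Mathlib
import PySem

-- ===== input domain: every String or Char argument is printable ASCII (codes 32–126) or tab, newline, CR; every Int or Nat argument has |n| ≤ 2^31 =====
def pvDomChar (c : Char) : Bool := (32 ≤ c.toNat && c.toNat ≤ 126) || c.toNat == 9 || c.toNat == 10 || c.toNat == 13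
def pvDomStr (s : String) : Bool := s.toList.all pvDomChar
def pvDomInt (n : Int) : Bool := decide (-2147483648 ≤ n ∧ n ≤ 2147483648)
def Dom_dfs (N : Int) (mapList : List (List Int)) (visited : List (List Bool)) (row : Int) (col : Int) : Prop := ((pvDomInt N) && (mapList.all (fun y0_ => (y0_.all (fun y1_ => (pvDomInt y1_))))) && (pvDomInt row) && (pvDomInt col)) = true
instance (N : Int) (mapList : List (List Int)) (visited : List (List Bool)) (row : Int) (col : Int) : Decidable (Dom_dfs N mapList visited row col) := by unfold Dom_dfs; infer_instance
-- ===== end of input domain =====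

-- B replaces A's recursive DFS by an iterative DFS over an explicit stack (same preorder,
-- same visited mutations; equivalence proved here is about the RETURN value — the in-place
-- mutation of `visited` is reproduced identically by B's algorithm but not part of the claim).

-- shared transliterations of the Python subscript expressions
-- visited[r][c]  (total form; Pre_ keeps every actually-performed access in range)
def pvVget (v : List (List Bool)) (r c : Int) : Bool :=
  PySem.List.pyGetD (PySem.List.pyGetD v r []) c false
-- mapList[r][c]
def pvMget (m : List (List Int)) (r c : Int) : Int :=
  PySem.List.pyGetD (PySem.List.pyGetD m r []) c 0
-- visited[r][c] = True
def pvVset (v : List (List Bool)) (r c : Int) : List (List Bool) :=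
  PySem.List.pySetD v r (PySem.List.pySetD (PySem.List.pyGetD v r []) c true)
-- number of False cells of `visited`: the termination fuel of both ports
def pvUnvis (v : List (List Bool)) : Nat := (v.map (fun r => r.count false)).sum

-- ===== PORT A =====
-- A's recursion, fueled (fuel only makes the recursion structural; with fuel > pvUnvis v the
-- 0-branch is never reached). Returns Python's return value together with the mutated visited.
def dfsA (N : Int) (m : List (List Int)) : Nat → List (List Bool) → Int → Int → Bool × List (List Bool)
  | 0, v, _, _ => (false, v)
  | f+1, v, row, col =>
    if row < 0 ∨ N ≤ row ∨ col < 0 ∨ N ≤ col ∨ pvVget v row col = true then (false, v)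
    else if pvMget m row col = -1 then (true, v)
    else if pvMget m row col = 0 then (false, v)
    else
      let v' := pvVset v row col
      let p1 := dfsA N m f v' (row + pvMget m row col) col
      if p1.1 then (true, p1.2)
      else
        let p2 := dfsA N m f p1.2 row (col + pvMget m row col)
        if p2.1 then (true, p2.2) else (false, p2.2)

def dfs (N : Int) (mapList : List (List Int)) (visited : List (List Bool)) (row : Int) (col : Int) : Bool :=
  (dfsA N mapList (pvUnvis visited + 1) visited row col).1

-- ===== PORT B =====
-- B's while-loop over the stack, fueled (each iteration pops one entry; pushes happen only when
-- a cell is freshly marked, so 1 + 2 * pvUnvis v iterations always suffice).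
def loopB (N : Int) (m : List (List Int)) : Nat → List (Int × Int) → List (List Bool) → Bool
  | 0, _, _ => false
  | _+1, [], _ => false
  | f+1, (r, c) :: stack, v =>
    if r < 0 ∨ N ≤ r ∨ c < 0 ∨ N ≤ c ∨ pvVget v r c = true then loopB N m f stack v
    else if pvMget m r c = -1 then true
    else if pvMget m r c = 0 then loopB N m f stack v
    else loopB N m f ((r + pvMget m r c, c) :: (r, c + pvMget m r c) :: stack) (pvVset v r c)

def dfs_alt (N : Int) (mapList : List (List Int)) (visited : List (List Bool)) (row : Int) (col : Int) : Bool :=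
  loopB N mapList (1 + 2 * pvUnvis visited) [(row, col)] visited

-- ===== PRECONDITION & SPEC =====
def pvDimsV (N : Int) (v : List (List Bool)) : Prop :=
  N ≤ (v.length : Int) ∧ ∀ r ∈ v, N ≤ (r.length : Int)
def pvDimsM (N : Int) (m : List (List Int)) : Prop :=
  N ≤ (m.length : Int) ∧ ∀ r ∈ m, N ≤ (r.length : Int)

-- Python raises IndexError when a visited 0 ≤ r,c < N cell lies outside the actual list
-- structure; Pre_ therefore asks both grids to be at least N×N (or the start to be out of the
-- [0,N) board, where A returns False without any access). This is slightly narrower than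
-- no-raise: it also excludes ragged grids whose short rows the traversal happens not to touch
-- (see the cite in claim.json), on which A and B both still return the same value.
def Pre_dfs (N : Int) (mapList : List (List Int)) (visited : List (List Bool)) (row : Int) (col : Int) : Prop :=
  (pvDimsV N visited ∧ pvDimsM N mapList) ∨ row < 0 ∨ N ≤ row ∨ col < 0 ∨ N ≤ col

instance (N : Int) (mapList : List (List Int)) (visited : List (List Bool)) (row : Int) (col : Int) : Decidable (Pre_dfs N mapList visited row col) := by
  unfold Pre_dfs pvDimsV pvDimsM; infer_instance

def pvWitness_dfs : Int × List (List Int) × List (List Bool) × Int × Int :=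
  (2, [[1, 1], [-1, 0]], [[false, false], [false, false]], 0, 0)

def Spec_dfs (N : Int) (mapList : List (List Int)) (visited : List (List Bool)) (row : Int) (col : Int) (out : Bool) : Prop := out = dfs_alt N mapList visited row col
instance (N : Int) (mapList : List (List Int)) (visited : List (List Bool)) (row : Int) (col : Int) (out : Bool) : Decidable (Spec_dfs N mapList visited row col out) := by unfold Spec_dfs; infer_instance

-- ===== CLAIM (what is proved, stated in full; the proofs are below) =====
def Claim_equal_dfs : Prop := ∀ (N : Int) (mapList : List (List Int)) (visited : List (List Bool)) (row : Int) (col : Int), Dom_dfs N mapList visited row col → Pre_dfs N mapList visited row col → Spec_dfs N mapList visited row col (dfs N mapList visited row col)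


-- ===== LEMMAS AND PROOFS =====

lemma loopB_nil (N : Int) (m : List (List Int)) (f : Nat) (v : List (List Bool)) :
    loopB N m f [] v = false := by cases f <;> rfl

lemma count_set_true (l : List Bool) (j : Nat) (hj : j < l.length) (ha : l[j] = false) :
    (l.set j true).count false + 1 = l.count false := by
  induction l generalizing j with
  | nil => simp at hj
  | cons a t ih =>
    cases j with
    | zero => simp_all
    | succ k =>
      simp at hj ha
      have := ih k hj ha
      simp [List.count_cons]
      omega

lemma unvis_set (v : List (List Bool)) (i : Nat) (x : List Bool) (hi : i < v.length) :
    pvUnvis (v.set i x) + (v[i]).count false = pvUnvis v + x.count false := by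
  induction v generalizing i with
  | nil => simp at hi
  | cons a t ih =>
    cases i with
    | zero => simp [pvUnvis]; omega
    | succ k =>
      simp at hi
      have := ih k hi
      simp [pvUnvis] at this ⊢
      omega

-- the marked-cell facts: under the passed guard and the dimension precondition,
-- pvVset marks one fresh cell: shape preserved, pvUnvis decreases by exactly one.
lemma mark_facts (N : Int) (v : List (List Bool)) (r c : Int)
    (hd : pvDimsV N v) (hr0 : 0 ≤ r) (hrN : r < N) (hc0 : 0 ≤ c) (hcN : c < N)
    (hv : pvVget v r c = false) :
    pvDimsV N (pvVset v r c) ∧ pvUnvis (pvVset v r c) + 1 = pvUnvis v := by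
  obtain ⟨hlen, hrows⟩ := hd
  have hi : r.toNat < v.length := by omega
  have hrowmem : v[r.toNat] ∈ v := List.getElem_mem hi
  have hrowlen : N ≤ (v[r.toNat].length : Int) := hrows _ hrowmem
  have hj : c.toNat < v[r.toNat].length := by omega
  have hget1 : PySem.List.pyGetD v r ([] : List Bool) = v[r.toNat] := by
    rw [PySem.List.pyGetD_eq_getElem v [] hr0 (by omega)]
  have hset : pvVset v r c = v.set r.toNat (v[r.toNat].set c.toNat true) := by
    unfold pvVset
    rw [hget1, PySem.List.pySetD_of_nonneg _ _ hc0, PySem.List.pySetD_of_nonneg _ _ hr0]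
  have hvget : v[r.toNat][c.toNat] = false := by
    unfold pvVget at hv
    rw [hget1, PySem.List.pyGetD_eq_getElem _ false hc0 (by omega)] at hv
    exact hv
  constructor
  · constructor
    · simp [hset]; omega
    · intro row hrow
      rw [hset] at hrow
      rcases List.mem_or_eq_of_mem_set hrow with h | h
      · exact hrows _ h
      · subst h; simp; omega
  · rw [hset]
    have h1 := unvis_set v r.toNat (v[r.toNat].set c.toNat true) hi
    have h2 := count_set_true (v[r.toNat]) c.toNat hj hvget
    omega

-- A-side bundle: shape preservation, pvUnvis monotonicity, and fuel-irrelevance.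
lemma dfsA_key (N : Int) (m : List (List Int)) :
    ∀ (f : Nat) (v : List (List Bool)) (r c : Int), pvDimsV N v → pvUnvis v < f →
      pvDimsV N (dfsA N m f v r c).2 ∧ pvUnvis (dfsA N m f v r c).2 ≤ pvUnvis v ∧
      ∀ g, pvUnvis v < g → dfsA N m g v r c = dfsA N m f v r c := by
  intro f
  induction f with
  | zero => intro v r c _ h; omega
  | succ f ih =>
    intro v r c hd hf
    have unfold1 : ∀ g v' (r' c' : Int), dfsA N m (g+1) v' r' c' =
      (if r' < 0 ∨ N ≤ r' ∨ c' < 0 ∨ N ≤ c' ∨ pvVget v' r' c' = true then (false, v')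
       else if pvMget m r' c' = -1 then (true, v')
       else if pvMget m r' c' = 0 then (false, v')
       else
         let v'' := pvVset v' r' c'
         let p1 := dfsA N m g v'' (r' + pvMget m r' c') c'
         if p1.1 then (true, p1.2)
         else
           let p2 := dfsA N m g p1.2 r' (c' + pvMget m r' c')
           if p2.1 then (true, p2.2) else (false, p2.2)) := by
      intro g v' r' c'; rfl
    by_cases hg : r < 0 ∨ N ≤ r ∨ c < 0 ∨ N ≤ c ∨ pvVget v r c = true
    · have hmain : dfsA N m (f+1) v r c = (false, v) := by rw [unfold1, if_pos hg]
      refine ⟨by rw [hmain]; exact hd, by rw [hmain], ?_⟩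
      intro g hgf
      obtain ⟨g', rfl⟩ : ∃ g', g = g' + 1 := ⟨g - 1, by omega⟩
      rw [unfold1, if_pos hg, hmain]
    · rcases not_or.mp hg with ⟨hr0, hrest⟩
      rcases not_or.mp hrest with ⟨hrN, hrest2⟩
      rcases not_or.mp hrest2 with ⟨hc0, hrest3⟩
      rcases not_or.mp hrest3 with ⟨hcN, hvt⟩
      have hv : pvVget v r c = false := by simpa using hvt
      by_cases hm1 : pvMget m r c = -1
      · have hmain : dfsA N m (f+1) v r c = (true, v) := by rw [unfold1, if_neg hg, if_pos hm1]
        refine ⟨by rw [hmain]; exact hd, by rw [hmain], ?_⟩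
        intro g hgf
        obtain ⟨g', rfl⟩ : ∃ g', g = g' + 1 := ⟨g - 1, by omega⟩
        rw [unfold1, if_neg hg, if_pos hm1, hmain]
      · by_cases hm0 : pvMget m r c = 0
        · have hmain : dfsA N m (f+1) v r c = (false, v) := by rw [unfold1, if_neg hg, if_neg hm1, if_pos hm0]
          refine ⟨by rw [hmain]; exact hd, by rw [hmain], ?_⟩
          intro g hgf
          obtain ⟨g', rfl⟩ : ∃ g', g = g' + 1 := ⟨g - 1, by omega⟩
          rw [unfold1, if_neg hg, if_neg hm1, if_pos hm0, hmain]
        · -- marking branch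
          obtain ⟨hd', hu'⟩ := mark_facts N v r c hd (by omega) (by omega) (by omega) (by omega) hv
          set v' := pvVset v r c with hv'def
          have hub : pvUnvis v' < f := by omega
          have key1 := ih v' (r + pvMget m r c) c hd' hub
          set p1 := dfsA N m f v' (r + pvMget m r c) c with hp1
          have hub2 : pvUnvis p1.2 < f := by
            have := key1.2.1; omega
          have key2 := ih p1.2 r (c + pvMget m r c) key1.1 hub2
          set p2 := dfsA N m f p1.2 r (c + pvMget m r c) with hp2
          have hmain : dfsA N m (f+1) v r c = (if p1.1 then (true, p1.2) else if p2.1 then (true, p2.2) else (false, p2.2)) := by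
            rw [unfold1, if_neg hg, if_neg hm1, if_neg hm0]
          refine ⟨?_, ?_, ?_⟩
          · rw [hmain]
            split_ifs with h1 h2
            · exact key1.1
            · exact key2.1
            · exact key2.1
          · rw [hmain]
            have l1 := key1.2.1
            have l2 := key2.2.1
            split_ifs with h1 h2 <;> simp <;> omega
          · intro g hgf
            obtain ⟨g', rfl⟩ : ∃ g', g = g' + 1 := ⟨g - 1, by omega⟩
            have e1 : dfsA N m g' v' (r + pvMget m r c) c = p1 :=
              key1.2.2 g' (by omega)
            have e2 : dfsA N m g' p1.2 r (c + pvMget m r c) = p2 :=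
              key2.2.2 g' (by have := key1.2.1; omega)
            rw [unfold1, if_neg hg, if_neg hm1, if_neg hm0]
            simp only [← hv'def, e1, e2]
            rw [hmain]

-- simulation: one stack entry processed by B's loop equals one recursive call of A,
-- with the canonical fuel stack.length + 2 * pvUnvis maintained by the loop.
lemma simL (N : Int) (m : List (List Int)) :
    ∀ (u : Nat) (v : List (List Bool)), pvDimsV N v → pvUnvis v ≤ u →
      ∀ (stack : List (Int × Int)) (r c : Int),
        loopB N m (1 + stack.length + 2 * pvUnvis v) ((r, c) :: stack) v =
          (if (dfsA N m (pvUnvis v + 1) v r c).1 then true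
           else loopB N m (stack.length + 2 * pvUnvis (dfsA N m (pvUnvis v + 1) v r c).2)
                  stack (dfsA N m (pvUnvis v + 1) v r c).2) := by
  intro u
  induction u using Nat.strong_induction_on with
  | _ u ih =>
    intro v hd hu stack r c
    have unfoldL : ∀ g (stk : List (Int × Int)) v' (r' c' : Int), loopB N m (g+1) ((r', c') :: stk) v' =
      (if r' < 0 ∨ N ≤ r' ∨ c' < 0 ∨ N ≤ c' ∨ pvVget v' r' c' = true then loopB N m g stk v'
       else if pvMget m r' c' = -1 then true
       else if pvMget m r' c' = 0 then loopB N m g stk v'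
       else loopB N m g ((r' + pvMget m r' c', c') :: (r', c' + pvMget m r' c') :: stk) (pvVset v' r' c')) := by
      intro g stk v' r' c'; rfl
    have unfoldA : dfsA N m (pvUnvis v + 1) v r c =
      (if r < 0 ∨ N ≤ r ∨ c < 0 ∨ N ≤ c ∨ pvVget v r c = true then (false, v)
       else if pvMget m r c = -1 then (true, v)
       else if pvMget m r c = 0 then (false, v)
       else
         let v'' := pvVset v r c
         let p1 := dfsA N m (pvUnvis v) v'' (r + pvMget m r c) c
         if p1.1 then (true, p1.2)
         else
           let p2 := dfsA N m (pvUnvis v) p1.2 r (c + pvMget m r c)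
           if p2.1 then (true, p2.2) else (false, p2.2)) := rfl
    have hfuel : 1 + stack.length + 2 * pvUnvis v = (stack.length + 2 * pvUnvis v) + 1 := by omega
    rw [hfuel, unfoldL]
    by_cases hg : r < 0 ∨ N ≤ r ∨ c < 0 ∨ N ≤ c ∨ pvVget v r c = true
    · rw [if_pos hg, unfoldA, if_pos hg]; simp
    · rcases not_or.mp hg with ⟨hr0, hrest⟩
      rcases not_or.mp hrest with ⟨hrN, hrest2⟩
      rcases not_or.mp hrest2 with ⟨hc0, hrest3⟩
      rcases not_or.mp hrest3 with ⟨hcN, hvt⟩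
      have hv : pvVget v r c = false := by simpa using hvt
      rw [if_neg hg]
      by_cases hm1 : pvMget m r c = -1
      · rw [if_pos hm1, unfoldA, if_neg hg, if_pos hm1]; simp
      · by_cases hm0 : pvMget m r c = 0
        · rw [if_neg hm1, if_pos hm0, unfoldA, if_neg hg, if_neg hm1, if_pos hm0]; simp
        · rw [if_neg hm1, if_neg hm0]
          -- marking branch
          obtain ⟨hd', hu'⟩ := mark_facts N v r c hd (by omega) (by omega) (by omega) (by omega) hv
          set v' := pvVset v r c with hv'def
          have huv : 1 ≤ pvUnvis v := by omega
          have keyA := dfsA_key N m (pvUnvis v) v' (r + pvMget m r c) c hd' (by omega)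
          set p1 := dfsA N m (pvUnvis v) v' (r + pvMget m r c) c with hp1
          have keyB := dfsA_key N m (pvUnvis v) p1.2 r (c + pvMget m r c) keyA.1 (by have := keyA.2.1; omega)
          set p2 := dfsA N m (pvUnvis v) p1.2 r (c + pvMget m r c) with hp2
          have hA : dfsA N m (pvUnvis v + 1) v r c =
              (if p1.1 then (true, p1.2) else if p2.1 then (true, p2.2) else (false, p2.2)) := by
            rw [unfoldA, if_neg hg, if_neg hm1, if_neg hm0]
          rw [hA]

          have ihp1 : dfsA N m (pvUnvis v' + 1) v' (r + pvMget m r c) c = p1 := by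
            rw [hp1]
            have h : pvUnvis v' + 1 = pvUnvis v := by omega
            rw [h]
          have ihp2 : dfsA N m (pvUnvis p1.2 + 1) p1.2 r (c + pvMget m r c) = p2 := by
            rw [hp2]
            exact keyB.2.2 (pvUnvis p1.2 + 1) (by omega)
          have step1 := ih (pvUnvis v') (by omega) v' hd' (le_refl _) ((r, c + pvMget m r c) :: stack) (r + pvMget m r c) c
          rw [ihp1] at step1
          have hlen1 : 1 + ((r, c + pvMget m r c) :: stack).length + 2 * pvUnvis v' = stack.length + 2 * pvUnvis v := by
            simp; omega
          rw [hlen1] at step1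
          rw [step1]
          by_cases hb1 : p1.1 = true
          · simp [hb1]
          · have hb1' : p1.1 = false := by simpa using hb1
            have step2 := ih (pvUnvis p1.2) (by have := keyA.2.1; omega) p1.2 keyA.1 (le_refl _) stack r (c + pvMget m r c)
            rw [ihp2] at step2
            have hlen2 : 1 + stack.length + 2 * pvUnvis p1.2 = ((r, c + pvMget m r c) :: stack).length + 2 * pvUnvis p1.2 := by
              simp; omega
            rw [hlen2] at step2
            rw [step2]
            by_cases hb2 : p2.1 = true
            · simp [hb1', hb2]
            · have hb2' : p2.1 = false := by simpa using hb2
              simp [hb1', hb2']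

-- ===== VERDICT (by name: the statement is the Claim_ definition above) =====
theorem dfs_spec : Claim_equal_dfs := by
  intro N m v r c _hdom hpre
  unfold Spec_dfs dfs dfs_alt
  rcases hpre with ⟨hdV, _hdM⟩ | hoob
  · have := simL N m (pvUnvis v) v hdV (le_refl _) [] r c
    have hf : 1 + ([] : List (Int × Int)).length + 2 * pvUnvis v = 1 + 2 * pvUnvis v := by simp
    rw [hf] at this
    rw [this]
    split_ifs with h
    · exact h
    · rw [loopB_nil]; simpa using h
  · have hg : r < 0 ∨ N ≤ r ∨ c < 0 ∨ N ≤ c ∨ pvVget v r c = true := by tauto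
    have hA : dfsA N m (pvUnvis v + 1) v r c = (false, v) := by
      show (if r < 0 ∨ N ≤ r ∨ c < 0 ∨ N ≤ c ∨ pvVget v r c = true then ((false : Bool), v) else _) = (false, v)
      rw [if_pos hg]
    have hf : 1 + 2 * pvUnvis v = (2 * pvUnvis v) + 1 := by omega
    rw [hA, hf]
    show false = (if r < 0 ∨ N ≤ r ∨ c < 0 ∨ N ≤ c ∨ pvVget v r c = true then loopB N m (2 * pvUnvis v) [] v else _)
    rw [if_pos hg, loopB_nil]
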